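-- pv_equiv track=rewrite | github.com/AndreaNathalia/ProyectoBigM | FlaskApp/resultados.py | maximizacion
-- ===== SOURCE A (Python) =====
-- def maximizacion(valores, punts):
--   valor = valores[0]
--   pO = punts[0]
--
--   for i in range(len(valores)):
--     if valores[i] > valor:
--       valor = valores[i]
--       pO = punts[i]
--
--   answer = str(valor) # -- Z
--   xy = pO             # -- Punto Optimo (x,y)
--   return answer, xy
-- ===== SOURCE B (Python) =====
-- def maximizacion(valores, punts):
--     valor = max(valores)
--     return str(valor), punts[valores.index(valor)]
-- ===== Notes on version B (the rewrite author's own statement) =====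
-- stated objective: simpler
-- what changed: Replaces the manual single-pass argmax loop over indices with a two-pass decomposition: max(valores) computes the maximum, valores.index locates its first occurrence, and that index selects the point; both built-ins pick the earliest maximal element, matching A's tie-breaking.
import Mathlib
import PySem

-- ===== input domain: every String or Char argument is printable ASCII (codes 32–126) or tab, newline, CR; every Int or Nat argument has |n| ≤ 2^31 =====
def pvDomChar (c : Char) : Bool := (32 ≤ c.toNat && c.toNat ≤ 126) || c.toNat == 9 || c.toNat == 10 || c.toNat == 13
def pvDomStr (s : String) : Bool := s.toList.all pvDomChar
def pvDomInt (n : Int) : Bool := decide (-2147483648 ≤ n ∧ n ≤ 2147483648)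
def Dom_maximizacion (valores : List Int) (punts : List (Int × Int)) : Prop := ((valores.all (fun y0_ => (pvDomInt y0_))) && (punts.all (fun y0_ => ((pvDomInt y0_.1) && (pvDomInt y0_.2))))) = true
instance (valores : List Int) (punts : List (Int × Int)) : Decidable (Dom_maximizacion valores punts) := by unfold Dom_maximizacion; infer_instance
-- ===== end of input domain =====

-- B replaces A's single-pass argmax index loop by a two-pass decomposition (max, then first index of it); objective: simpler.


-- ===== PORT A =====
def maximizacion (valores : List Int) (punts : List (Int × Int)) : String × (Int × Int) :=
  let valor : Int := PySem.List.pyGetD valores 0 0            -- valores[0]; IndexError on empty excluded by Pre_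
  let pO : Int × Int := PySem.List.pyGetD punts 0 (0, 0)      -- punts[0]; IndexError on empty excluded by Pre_
  let s :=
    (PySem.List.pyRange 0 (valores.length : Int) 1).foldl
      (fun (s : Int × (Int × Int)) i =>
        if PySem.List.pyGetD valores i 0 > s.1 then
          (PySem.List.pyGetD valores i 0, PySem.List.pyGetD punts i (0, 0))  -- punts[i]; out of range excluded by Pre_
        else s)
      (valor, pO)
  (PySem.Int.toStr s.1, s.2)

-- ===== PORT B =====
def maximizacion_alt (valores : List Int) (punts : List (Int × Int)) : String × (Int × Int) :=
  let valor : Int := (PySem.List.max? valores (fun y => y)).getD 0   -- max(valores); empty excluded by Pre_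
  let idx : Nat := (PySem.List.index? valores valor).getD 0          -- valores.index(valor)
  (PySem.Int.toStr valor, PySem.List.pyGetD punts (idx : Int) (0, 0)) -- punts[idx]; in range under Pre_

-- ===== PRECONDITION & SPEC =====
-- Pre_ is exactly where the Python A returns: both lists nonempty and the first occurrence of the
-- maximum of valores lies within punts (A indexes punts at 0 and at running-max positions, the
-- largest of which is that first occurrence; anywhere else A raises IndexError).
def Pre_maximizacion (valores : List Int) (punts : List (Int × Int)) : Prop :=
  valores ≠ [] ∧ punts ≠ [] ∧
  (PySem.List.index? valores ((PySem.List.max? valores (fun y => y)).getD 0)).getD 0 < punts.length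
instance (valores : List Int) (punts : List (Int × Int)) : Decidable (Pre_maximizacion valores punts) := by
  unfold Pre_maximizacion; infer_instance

def pvWitness_maximizacion : List Int × (List (Int × Int)) := ([3, 7, 7, 2], [(1, 2), (4, 5), (0, 0), (9, 9)])

def Spec_maximizacion (valores : List Int) (punts : List (Int × Int)) (out : String × (Int × Int)) : Prop := out = maximizacion_alt valores punts
instance (valores : List Int) (punts : List (Int × Int)) (out : String × (Int × Int)) : Decidable (Spec_maximizacion valores punts out) := by unfold Spec_maximizacion; infer_instance

-- ===== CLAIM (what is proved, stated in full; the proofs are below) =====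
def Claim_equal_maximizacion : Prop := ∀ (valores : List Int) (punts : List (Int × Int)), Dom_maximizacion valores punts → Pre_maximizacion valores punts → Spec_maximizacion valores punts (maximizacion valores punts)

-- ===== LEMMAS AND PROOFS =====

-- Invariant of A's loop: after the first k iterations (1 ≤ k ≤ n) the state is the maximum of the
-- first k values together with the point at its first occurrence index j (which is < k).
lemma maximizacion_loop (v : Int) (t : List Int) (punts : List (Int × Int)) :
    ∀ (k : Nat), 1 ≤ k → k ≤ (v :: t).length →
    ∃ j : Nat,
      PySem.List.index? (v :: t) (((v :: t).take k).foldl max v) = some j ∧ j < k ∧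
      (PySem.List.pyRange 0 (k : Int) 1).foldl
        (fun (s : Int × (Int × Int)) i =>
          if PySem.List.pyGetD (v :: t) i 0 > s.1 then
            (PySem.List.pyGetD (v :: t) i 0, PySem.List.pyGetD punts i (0, 0))
          else s)
        (v, PySem.List.pyGetD punts 0 (0, 0))
      = (((v :: t).take k).foldl max v, PySem.List.pyGetD punts ((j : Nat) : Int) (0, 0)) := by
  intro k
  induction k with
  | zero => omega
  | succ k ih =>
    intro _ hlen
    by_cases hk0 : k = 0
    · subst hk0
      refine ⟨0, ?_, Nat.one_pos, ?_⟩
      · simpa [max_self] using PySem.List.index?_cons_self v t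
      · have hr : PySem.List.pyRange 0 (((0 : Nat) + 1 : Nat) : Int) 1 = [0] := by decide
        rw [hr]
        simp [List.foldl, max_self]
    · have hk1 : 1 ≤ k := by omega
      obtain ⟨j, hidx, hjk, hfold⟩ := ih hk1 (by omega)
      have hklen : k < (v :: t).length := by omega
      have hcast : ((k + 1 : Nat) : Int) = ((k : Nat) : Int) + 1 := by push_cast; ring
      rw [hcast, PySem.List.pyRange_one_succ_right (by positivity), List.foldl_append, hfold]
      have hget : PySem.List.pyGetD (v :: t) ((k : Nat) : Int) 0 = (v :: t)[k] := by
        rw [PySem.List.pyGetD_natCast, List.getD_eq_getElem _ _ hklen]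
      have htake : (v :: t).take (k + 1) = (v :: t).take k ++ [(v :: t)[k]] := by
        rw [List.take_add_one, List.getElem?_eq_getElem hklen]; rfl
      have hM : ((v :: t).take (k + 1)).foldl max v
          = max (((v :: t).take k).foldl max v) ((v :: t)[k]) := by
        rw [htake, List.foldl_append]; rfl
      by_cases hcmp : ((v :: t).take k).foldl max v < (v :: t)[k]
      · refine ⟨k, ?_, by omega, ?_⟩
        · have hMk : ((v :: t).take (k + 1)).foldl max v = (v :: t)[k] := by
            rw [hM, max_eq_right (le_of_lt hcmp)]
          rw [hMk, PySem.List.index?_eq_some_iff]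
          refine ⟨(v :: t).take k, (v :: t).drop (k + 1), ?_, ?_, ?_⟩
          · conv_lhs => rw [← List.take_append_drop k (v :: t)]
            rw [List.drop_eq_getElem_cons hklen]
          · rw [List.length_take]; omega
          · intro hmem
            have hle := (PySem.List.le_foldl_max ((v :: t).take k) v).2 _ hmem
            exact absurd hcmp (not_lt.mpr hle)
        · simp only [List.foldl, hget, hcmp, if_pos]
          rw [hM, max_eq_right (le_of_lt hcmp)]
      · refine ⟨j, ?_, by omega, ?_⟩
        · rw [hM, max_eq_left (not_lt.mp hcmp)]; exact hidx
        · simp only [List.foldl, hget, gt_iff_lt, hcmp, if_false]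
          rw [hM, max_eq_left (not_lt.mp hcmp)]

-- ===== VERDICT (by name: the statement is the Claim_ definition above) =====
theorem maximizacion_spec : Claim_equal_maximizacion := by
  intro valores punts _ hpre
  obtain ⟨hne, hpne, hlt⟩ := hpre
  obtain ⟨v, t, rfl⟩ := List.exists_cons_of_ne_nil hne
  unfold Spec_maximizacion maximizacion maximizacion_alt
  obtain ⟨j, hidx, hjk, hfold⟩ :=
    maximizacion_loop v t punts (v :: t).length (by simp) le_rfl
  have hMn : (((v :: t).take (v :: t).length).foldl max v) = t.foldl max v := by
    rw [List.take_length]; simp [List.foldl, max_self]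
  rw [hMn] at hidx hfold
  simp only [PySem.List.pyGetD_zero_cons, hfold, PySem.List.max?_id_cons, Option.getD_some,
    hidx]
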